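-- pv_equiv track=rewrite | github.com/deephaven/deephaven-mcp | scripts/refactor_split_mcp_v4.py | build_import_section
-- ===== SOURCE A (Python) =====
-- def build_import_section(module_name, dependencies):
--     """Build import statements for cross-module dependencies."""
--     if module_name not in dependencies or not dependencies[module_name]:
--         return ""
--
--     # Group by source module
--     imports_by_module = {}
--     for source_module, item_name in dependencies[module_name]:
--         if source_module not in imports_by_module:
--             imports_by_module[source_module] = []
--         imports_by_module[source_module].append(item_name)
--
--     # Build import statements
--     import_lines = []
--     for source_module in sorted(imports_by_module.keys()):
--         items = sorted(imports_by_module[source_module])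
--         module_path = source_module[:-3]  # Remove .py
--         import_lines.append(f"from deephaven_mcp.mcp_systems_server._tools.{module_path} import (")
--         for item in items:
--             import_lines.append(f"    {item},")
--         import_lines.append(")")
--
--     return '\n'.join(import_lines)
-- ===== SOURCE B (Python) =====
-- def build_import_section(module_name, dependencies):
--     """Build import statements for cross-module dependencies."""
--     deps = dependencies.get(module_name)
--     if not deps:
--         return ""
--     lines = []
--     for source in sorted({s for s, _ in deps}):
--         lines.append(f"from deephaven_mcp.mcp_systems_server._tools.{source[:-3]} import (")
--         for item in sorted(i for s, i in deps if s == source):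
--             lines.append(f"    {item},")
--         lines.append(")")
--     return '\n'.join(lines)
-- ===== Notes on version B (the rewrite author's own statement) =====
-- stated objective: alternative
-- what changed: B drops A's one-pass dict grouping: it sorts the set of distinct source modules once and, for each module, re-scans the dependency list with a filter to collect that module's items.
import Mathlib
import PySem

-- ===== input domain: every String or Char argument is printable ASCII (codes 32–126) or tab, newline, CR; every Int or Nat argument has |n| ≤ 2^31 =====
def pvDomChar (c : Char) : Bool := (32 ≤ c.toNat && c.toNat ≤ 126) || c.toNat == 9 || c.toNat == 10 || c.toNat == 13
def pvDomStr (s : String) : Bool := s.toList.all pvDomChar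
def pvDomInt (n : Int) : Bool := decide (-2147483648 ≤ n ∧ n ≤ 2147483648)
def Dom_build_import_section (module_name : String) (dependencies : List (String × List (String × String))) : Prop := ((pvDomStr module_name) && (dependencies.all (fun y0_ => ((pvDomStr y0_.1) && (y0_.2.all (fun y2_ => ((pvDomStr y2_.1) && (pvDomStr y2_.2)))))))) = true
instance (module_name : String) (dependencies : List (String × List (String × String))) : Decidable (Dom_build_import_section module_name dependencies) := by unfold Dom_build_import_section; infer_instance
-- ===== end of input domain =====

-- B replaces A's one-pass dict grouping by a sorted set of the distinct source modules
-- plus one filtering re-scan of the dependency list per module (objective: alternative).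

-- ===== PORT A =====
def build_import_section (module_name : String) (dependencies : List (String × List (String × String))) : String :=
  match dependencies.lookup module_name with
  | none => ""
  | some ds =>
    if ds = [] then ""
    else
      -- imports_by_module: if source not in dict insert [], then append item
      let d : PySem.Dict String (List String) := ds.foldl
        (fun m p =>
          let m := if m.contains p.1 then m else m.insert p.1 []
          m.modify p.1 [] (fun l => l ++ [p.2]))
        PySem.Dict.empty
      let lines := (PySem.List.sorted d.keys (fun s => s)).foldl
        (fun acc source =>
          let items := PySem.List.sorted (d.getD source []) (fun s => s)
          let module_path := PySem.Str.slice source none (some (-3))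
          let acc := acc ++ ["from deephaven_mcp.mcp_systems_server._tools." ++ module_path ++ " import ("]
          let acc := items.foldl (fun a item => a ++ ["    " ++ item ++ ","]) acc
          acc ++ [")"]) []
      PySem.Str.join "\n" lines

-- ===== PORT B =====
def build_import_section_alt (module_name : String) (dependencies : List (String × List (String × String))) : String :=
  match dependencies.lookup module_name with
  | none => ""
  | some ds =>
    if ds = [] then ""
    else
      let lines := (PySem.List.sorted (PySem.Set.ofList (ds.map (·.1))) (fun s => s)).foldl
        (fun acc source =>
          let acc := acc ++ ["from deephaven_mcp.mcp_systems_server._tools." ++ PySem.Str.slice source none (some (-3)) ++ " import ("]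
          let acc := (PySem.List.sorted ((ds.filter (fun p => p.1 == source)).map (·.2)) (fun s => s)).foldl
            (fun a item => a ++ ["    " ++ item ++ ","]) acc
          acc ++ [")"]) []
      PySem.Str.join "\n" lines

-- ===== PRECONDITION & SPEC =====
def Spec_build_import_section (module_name : String) (dependencies : List (String × List (String × String))) (out : String) : Prop := out = build_import_section_alt module_name dependencies
instance (module_name : String) (dependencies : List (String × List (String × String))) (out : String) : Decidable (Spec_build_import_section module_name dependencies out) := by unfold Spec_build_import_section; infer_instance

-- ===== CLAIM (what is proved, stated in full; the proofs are below) =====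
def Claim_equal_build_import_section : Prop := ∀ (module_name : String) (dependencies : List (String × List (String × String))), Dom_build_import_section module_name dependencies → Spec_build_import_section module_name dependencies (build_import_section module_name dependencies)

-- ===== LEMMAS AND PROOFS =====

-- the grouping step of A's first loop
def pvStep (m : PySem.Dict String (List String)) (p : String × String) : PySem.Dict String (List String) :=
  let m := if m.contains p.1 then m else m.insert p.1 []
  m.modify p.1 [] (fun l => l ++ [p.2])

lemma pvStep_keys (m : PySem.Dict String (List String)) (p : String × String) :
    (pvStep m p).keys = PySem.Set.add m.keys p.1 := by
  unfold pvStep PySem.Set.add PySem.Set.contains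
  by_cases h : m.contains p.1 = true
  · have hc : m.keys.contains p.1 = true := by
      simpa using (PySem.Dict.contains_iff_mem_keys m p.1).mp h
    simp only [h, if_true, hc, PySem.Dict.keys_modify]
    exact PySem.Dict.keys_insert_of_contains m _ h
  · have hb : m.contains p.1 = false := by simpa using h
    have hc : m.keys.contains p.1 = false := by
      simp only [List.contains_eq_mem, decide_eq_false_iff_not]
      exact fun hm => h ((PySem.Dict.contains_iff_mem_keys m p.1).mpr hm)
    simp only [hb, Bool.false_eq_true, if_false, hc, PySem.Dict.keys_modify]
    rw [PySem.Dict.keys_insert_of_contains _ _ (PySem.Dict.contains_insert_self m p.1 []),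
        PySem.Dict.keys_insert_of_not_contains _ _ hb]

lemma pvFold_keys (ds : List (String × String)) (m : PySem.Dict String (List String)) :
    (ds.foldl pvStep m).keys = ds.foldl (fun s p => PySem.Set.add s p.1) m.keys := by
  induction ds generalizing m with
  | nil => rfl
  | cons p t ih => simp only [List.foldl_cons, ih, pvStep_keys]

lemma pvStep_getD (m : PySem.Dict String (List String)) (p : String × String) (k : String) :
    (pvStep m p).getD k [] = m.getD k [] ++ (if p.1 == k then [p.2] else []) := by
  unfold pvStep
  by_cases hk : p.1 = k
  · subst hk
    have hbase : (if m.contains p.1 = true then m else m.insert p.1 []).getD p.1 [] = m.getD p.1 [] := by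
      by_cases h : m.contains p.1 = true
      · simp [h]
      · have hnone : m.get? p.1 = none :=
          (PySem.Dict.get?_eq_none_iff_contains m p.1).mpr (by simpa using h)
        simp [h, PySem.Dict.getD, hnone]
    simp [PySem.Dict.getD_modify_self, hbase]
  · have hk' : k ≠ p.1 := fun h => hk h.symm
    have hne : (p.1 == k) = false := by simpa using hk
    rw [PySem.Dict.getD_modify_of_ne _ _ _ hk']
    by_cases h : m.contains p.1 = true
    · simp [h, hne]
    · simp [h, PySem.Dict.getD_insert_of_ne _ _ _ hk', hne]

lemma pvFold_getD (ds : List (String × String)) (m : PySem.Dict String (List String)) (k : String) :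
    (ds.foldl pvStep m).getD k [] = m.getD k [] ++ (ds.filter (fun p => p.1 == k)).map (·.2) := by
  induction ds generalizing m with
  | nil => simp
  | cons p t ih =>
    simp only [List.foldl_cons, ih, pvStep_getD, List.filter_cons]
    by_cases h : (p.1 == k) = true
    · simp [h, List.append_assoc]
    · simp [h]

-- ===== VERDICT (by name: the statement is the Claim_ definition above) =====
theorem build_import_section_spec : Claim_equal_build_import_section := by
  intro module_name dependencies _
  unfold Spec_build_import_section build_import_section build_import_section_alt
  cases dependencies.lookup module_name with
  | none => rfl
  | some ds =>
    simp only
    by_cases hds : ds = []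
    · simp [hds]
    · simp only [hds, if_false]
      have hkeys : (ds.foldl pvStep PySem.Dict.empty).keys
          = PySem.Set.ofList (ds.map (·.1)) := by
        rw [pvFold_keys, PySem.Set.ofList_eq_foldl, List.foldl_map]
        rfl
      have hgetD : ∀ k, (ds.foldl pvStep PySem.Dict.empty).getD k []
          = (ds.filter (fun p => p.1 == k)).map (·.2) := by
        intro k
        rw [pvFold_getD]
        rfl
      show PySem.Str.join "\n" _ = PySem.Str.join "\n" _
      congr 1
      rw [show (fun (m : PySem.Dict String (List String)) (p : String × String) =>
            let m := if m.contains p.1 then m else m.insert p.1 []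
            m.modify p.1 [] (fun l => l ++ [p.2])) = pvStep from rfl]
      rw [hkeys]
      apply PySem.List.foldl_congr_mem
      intro acc source _
      simp only [hgetD]
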